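-- pv_equiv track=rewrite | github.com/TabbieManywanda/alx-higher_level_programming | 0x04-python-more_data_structures/102-complex_delete.py | complex_delete
-- ===== SOURCE A (Python) =====
-- def complex_delete(a_dictionary, value):
--     tobedeleted = []
--     for x, y in a_dictionary.items():
--         if y == value:
--             tobedeleted.append(x)
--     for z in tobedeleted:
--         del a_dictionary[z]
--     return a_dictionary
-- ===== SOURCE B (Python) =====
-- def complex_delete(a_dictionary, value):
--     kept = {x: y for x, y in a_dictionary.items() if y != value}
--     a_dictionary.clear()
--     a_dictionary.update(kept)
--     return a_dictionary
-- ===== Notes on version B (the rewrite author's own statement) =====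
-- stated objective: simpler
-- what changed: Replaces A's two-pass collect-keys-then-delete loop with a single dict-comprehension filter whose result is written back via clear()+update(), preserving object identity and insertion order.
import Mathlib
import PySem

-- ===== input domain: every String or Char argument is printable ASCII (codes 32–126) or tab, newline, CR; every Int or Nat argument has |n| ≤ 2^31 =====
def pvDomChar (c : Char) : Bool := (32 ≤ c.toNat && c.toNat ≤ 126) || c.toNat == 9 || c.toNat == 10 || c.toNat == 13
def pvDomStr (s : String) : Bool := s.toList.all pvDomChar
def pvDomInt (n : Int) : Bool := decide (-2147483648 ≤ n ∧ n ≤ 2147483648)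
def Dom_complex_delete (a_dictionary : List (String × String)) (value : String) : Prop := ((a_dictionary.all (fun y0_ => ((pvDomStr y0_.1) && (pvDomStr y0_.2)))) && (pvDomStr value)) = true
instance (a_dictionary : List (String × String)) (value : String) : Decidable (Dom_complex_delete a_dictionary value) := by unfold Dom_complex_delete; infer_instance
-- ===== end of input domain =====

-- B replaces A's collect-keys-then-delete two-pass loop with a filter comprehension
-- written back via clear()+update(); same return value (and same in-place mutation effect).
-- ===== PORT A =====
def complex_delete (a_dictionary : List (String × String)) (value : String) : List (String × String) :=
  let d := PySem.Dict.ofList a_dictionary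
  -- tobedeleted = []; for x, y in a_dictionary.items(): if y == value: tobedeleted.append(x)
  let tobedeleted := d.items.foldl (fun acc p => if p.2 == value then acc ++ [p.1] else acc) []
  -- for z in tobedeleted: del a_dictionary[z]   (every z is a key of d, so no KeyError)
  let d := tobedeleted.foldl (fun d z => d.erase z) d
  d.items

-- ===== PORT B =====
def complex_delete_alt (a_dictionary : List (String × String)) (value : String) : List (String × String) :=
  let d := PySem.Dict.ofList a_dictionary
  -- kept = {x: y for x, y in a_dictionary.items() if y != value}
  let kept := PySem.Dict.ofList (d.items.filter (fun p => !(p.2 == value)))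
  -- a_dictionary.clear(); a_dictionary.update(kept); return a_dictionary
  (PySem.Dict.empty.update kept.items).items

-- ===== PRECONDITION & SPEC =====
def Spec_complex_delete (a_dictionary : List (String × String)) (value : String) (out : List (String × String)) : Prop := out = complex_delete_alt a_dictionary value
instance (a_dictionary : List (String × String)) (value : String) (out : List (String × String)) : Decidable (Spec_complex_delete a_dictionary value out) := by unfold Spec_complex_delete; infer_instance

-- ===== CLAIM (what is proved, stated in full; the proofs are below) =====
def Claim_equal_complex_delete : Prop := ∀ (a_dictionary : List (String × String)) (value : String), Dom_complex_delete a_dictionary value → Spec_complex_delete a_dictionary value (complex_delete a_dictionary value)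

-- ===== LEMMAS AND PROOFS =====

-- ===== VERDICT (by name: the statement is the Claim_ definition above) =====
-- erasing a list of keys = one filter over the items
theorem foldl_erase_items {ν : Type} (ks : List String) (d : PySem.Dict String ν) :
    (ks.foldl (fun d z => d.erase z) d).items
      = d.items.filter (fun p => !(ks.contains p.1)) := by
  induction ks generalizing d with
  | nil => simp
  | cons k ks ih =>
    rw [List.foldl_cons, ih]
    simp only [PySem.Dict.erase, List.filter_filter]
    apply List.filter_congr
    intro p _
    by_cases h : p.1 = k <;> simp [h]

-- a list of pairs with distinct keys is returned unchanged by Dict.ofList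
theorem items_ofList_of_nodup {ν : Type} (l : List (String × ν))
    (h : (l.map Prod.fst).Nodup) : (PySem.Dict.ofList l).items = l := by
  have := PySem.Dict.items_foldl_insert_fresh l Prod.fst Prod.snd PySem.Dict.empty
    (by intro a _; simp [PySem.Dict.contains_empty]) h
  simpa [PySem.Dict.ofList, PySem.Dict.update] using this

-- on a nodup-key list, membership of p.1 among the keys of matching pairs ⟺ p matches
theorem filter_not_mem_deleted (l : List (String × String)) (value : String)
    (h : (l.map Prod.fst).Nodup) :
    l.filter (fun p => !(((l.filter (fun p => p.2 == value)).map Prod.fst).contains p.1))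
      = l.filter (fun p => !(p.2 == value)) := by
  apply List.filter_congr
  intro p hp
  simp only [List.contains_eq_mem]
  congr 1
  rw [Bool.eq_iff_iff]
  simp only [decide_eq_true_eq, List.mem_map, List.mem_filter, beq_iff_eq]
  constructor
  · rintro ⟨q, ⟨hq, hqv⟩, hq1⟩
    exact (List.inj_on_of_nodup_map h hq hp hq1) ▸ hqv
  · intro hv; exact ⟨p, ⟨hp, hv⟩, rfl⟩

theorem complex_delete_spec : Claim_equal_complex_delete := by
  intro a_dictionary value _
  unfold Spec_complex_delete complex_delete complex_delete_alt
  dsimp only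
  have hnd : ((PySem.Dict.ofList a_dictionary).items.map Prod.fst).Nodup :=
    PySem.Dict.nodup_keys_ofList a_dictionary
  revert hnd
  generalize hl : (PySem.Dict.ofList a_dictionary).items = l
  intro hnd
  rw [PySem.List.foldl_append_if (fun p => p.2 == value) Prod.fst l []]
  rw [foldl_erase_items, hl]
  have hnd2 : ((l.filter (fun p => !(p.2 == value))).map Prod.fst).Nodup :=
    List.Nodup.sublist (List.Sublist.map Prod.fst List.filter_sublist) hnd
  have e1 : (PySem.Dict.empty.update
        (PySem.Dict.ofList (l.filter (fun p => !(p.2 == value)))).items).items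
      = (PySem.Dict.ofList (l.filter (fun p => !(p.2 == value)))).items :=
    items_ofList_of_nodup _ (PySem.Dict.nodup_keys_ofList _)
  rw [e1, items_ofList_of_nodup _ hnd2]
  simp only [List.nil_append]
  exact filter_not_mem_deleted l value hnd
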